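-- pv_equiv track=rewrite | github.com/ck3user75233/ck3raven | tools/arch_lint/arch_lint_v2_3.py | match_composite_tokens
-- ===== SOURCE A (Python) =====
-- from typing import Iterable, Optional, Sequence, Tuple
--
-- def match_composite_tokens(tokens: list[str], pattern: str) -> Optional[Tuple[int, int]]:
--     """
--     Returns (start_index, end_index_exclusive) of the matched span in tokens, or None.
--     pattern format: 'a%b%c' => tokens a then b then c in order, with gaps allowed.
--     """
--     parts = [p.strip().lower() for p in pattern.split("%") if p.strip()]
--     if not parts:
--         return None
--     start = 0
--     first_pos = None
--     last_pos = None
--     for p in parts: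
--         try:
--             idx = tokens.index(p, start)
--         except ValueError:
--             return None
--         if first_pos is None:
--             first_pos = idx
--         last_pos = idx
--         start = idx + 1
--     return (first_pos or 0, (last_pos or 0) + 1)
-- ===== SOURCE B (Python) =====
-- from typing import Optional, Tuple
--
-- def match_composite_tokens(tokens: list[str], pattern: str) -> Optional[Tuple[int, int]]:
--     """Single pass over tokens with a pointer into the pattern parts."""
--     parts = [q for q in (p.strip().lower() for p in pattern.split("%")) if q]
--     if not parts:
--         return None
--     j = 0
--     first_pos = None
--     for i, tok in enumerate(tokens):
--         if tok == parts[j]: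
--             if j == 0:
--                 first_pos = i
--             j += 1
--             if j == len(parts):
--                 return (first_pos, i + 1)
--     return None
-- ===== Notes on version B (the rewrite author's own statement) =====
-- stated objective: alternative
-- what changed: Replaced the loop over pattern parts with repeated tokens.index(p, start) scans by a single pass over the tokens carrying a pointer into the parts, returning as soon as the last part matches.
import Mathlib
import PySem

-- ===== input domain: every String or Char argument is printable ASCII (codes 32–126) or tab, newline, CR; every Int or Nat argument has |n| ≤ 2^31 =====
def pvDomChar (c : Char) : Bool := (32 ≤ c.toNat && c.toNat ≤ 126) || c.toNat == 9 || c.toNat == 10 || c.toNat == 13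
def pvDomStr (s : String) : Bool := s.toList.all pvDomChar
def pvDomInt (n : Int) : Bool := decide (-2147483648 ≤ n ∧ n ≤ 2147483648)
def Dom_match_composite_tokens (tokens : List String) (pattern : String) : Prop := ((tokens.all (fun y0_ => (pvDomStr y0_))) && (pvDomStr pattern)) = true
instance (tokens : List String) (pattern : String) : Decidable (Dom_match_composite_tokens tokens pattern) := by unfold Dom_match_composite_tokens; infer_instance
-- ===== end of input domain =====

-- B replaces A's loop over the pattern parts (with repeated tokens.index(p, start) scans)
-- by a single pass over the tokens carrying a pointer into the parts (objective: alternative).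

-- ===== PORT A =====
-- A-side helpers
-- parts = [p.strip().lower() for p in pattern.split("%") if p.strip()]
def pvPartsA (pattern : String) : List String :=
  (((PySem.Str.split? pattern "%").getD []).filter
    (fun p => PySem.Str.strip p != "")).map (fun p => PySem.Str.lower (PySem.Str.strip p))

-- hand port of tokens.index(p, start): exact for 0 ≤ start (the only values A passes)
def pvIndexFrom (tokens : List String) (p : String) (start : Int) : Option Int :=
  match PySem.List.index? (tokens.drop start.toNat) p with
  | none => none
  | some k => some ((k : Int) + start)

-- the `for p in parts` loop with state (start, first_pos, last_pos) and early return on ValueError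
def pvALoop (tokens : List String) : List String → Int → Option Int → Option Int → Option (Int × Int)
  | [], _, first, last => some (first.getD 0, last.getD 0 + 1)
  | p :: ps, start, first, last =>
    match pvIndexFrom tokens p start with
    | none => none
    | some idx =>
      pvALoop tokens ps (idx + 1) (if first.isNone then some idx else first) (some idx)

def match_composite_tokens (tokens : List String) (pattern : String) : Option (Int × Int) :=
  let parts := pvPartsA pattern
  if parts.isEmpty then none
  else pvALoop tokens parts 0 none none

-- ===== PORT B =====
-- B-side helpers
-- parts = [q for q in (p.strip().lower() for p in pattern.split("%")) if q]
def pvPartsB (pattern : String) : List String :=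
  (((PySem.Str.split? pattern "%").getD []).map
    (fun p => PySem.Str.lower (PySem.Str.strip p))).filter (fun q => q != "")

-- the `for i, tok in enumerate(tokens)` loop; the remaining-parts list plays the role of j
-- (j == 0 iff first_pos is still None); `first_pos` in the returned pair is always set,
-- `.getD 0` only gives it an Option-free reading
def pvBLoop : List String → Int → List String → Option Int → Option (Int × Int)
  | [], _, _, _ => none
  | _ :: _, _, [], _ => none
  | tok :: ts, i, p :: ps, first =>
    if tok == p then
      let f := if first.isNone then some i else first
      match ps with
      | [] => some (f.getD 0, i + 1)
      | _ :: _ => pvBLoop ts (i + 1) ps f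
    else pvBLoop ts (i + 1) (p :: ps) first

def match_composite_tokens_alt (tokens : List String) (pattern : String) : Option (Int × Int) :=
  let parts := pvPartsB pattern
  if parts.isEmpty then none
  else pvBLoop tokens 0 parts none

-- ===== PRECONDITION & SPEC =====
def Spec_match_composite_tokens (tokens : List String) (pattern : String) (out : Option (Int × Int)) : Prop := out = match_composite_tokens_alt tokens pattern
instance (tokens : List String) (pattern : String) (out : Option (Int × Int)) : Decidable (Spec_match_composite_tokens tokens pattern out) := by unfold Spec_match_composite_tokens; infer_instance

-- ===== CLAIM (what is proved, stated in full; the proofs are below) =====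
def Claim_equal_match_composite_tokens : Prop := ∀ (tokens : List String) (pattern : String), Dom_match_composite_tokens tokens pattern → Spec_match_composite_tokens tokens pattern (match_composite_tokens tokens pattern)

-- ===== LEMMAS AND PROOFS =====

theorem pvLower_eq_empty_iff (t : String) : (PySem.Str.lower t = "") ↔ (t = "") := by
  rw [← String.toList_inj, ← String.toList_inj, PySem.Str.toList_lower]
  simp [PySem.Chars.lower]

theorem pvLower_bne_empty (t : String) : (PySem.Str.lower t != "") = (t != "") := by
  rw [Bool.eq_iff_iff]
  simp only [bne_iff_ne, ne_eq]
  exact not_congr (pvLower_eq_empty_iff t)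

theorem pvFilterMap (l : List String) :
    (l.filter (fun p => PySem.Str.strip p != "")).map (fun p => PySem.Str.lower (PySem.Str.strip p)) =
    (l.map (fun p => PySem.Str.lower (PySem.Str.strip p))).filter (fun q => q != "") := by
  induction l with
  | nil => rfl
  | cons a l ih =>
    simp only [List.map_cons, List.filter_cons]
    rw [pvLower_bne_empty]
    cases h : (PySem.Str.strip a != "") <;> simp [ih]

theorem pvParts_eq (pattern : String) : pvPartsA pattern = pvPartsB pattern :=
  pvFilterMap ((PySem.Str.split? pattern "%").getD [])

theorem pvBLoop_char (p : String) : ∀ (ts : List String) (i : Int) (ps : List String) (first : Option Int),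
    pvBLoop ts i (p :: ps) first =
    match PySem.List.index? ts p with
    | none => none
    | some k =>
      let idx : Int := i + (k : Int)
      let f := if first.isNone then some idx else first
      match ps with
      | [] => some (f.getD 0, idx + 1)
      | _ :: _ => pvBLoop (ts.drop (k + 1)) (idx + 1) ps f
  | [], i, ps, first => by rw [PySem.List.index?_eq_idxOf?]; simp [pvBLoop]
  | t :: ts, i, ps, first => by
    by_cases h : t = p
    · subst h
      rw [PySem.List.index?_cons_self]
      simp [pvBLoop]
    · have hb : (t == p) = false := by simp [h]
      rw [PySem.List.index?_cons_of_ne ts h]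
      rw [show pvBLoop (t :: ts) i (p :: ps) first = pvBLoop ts (i + 1) (p :: ps) first by
        simp [pvBLoop, hb]]
      rw [pvBLoop_char p ts (i + 1) ps first]
      cases hk : PySem.List.index? ts p with
      | none => simp
      | some k =>
        simp only [Option.map_some]
        have : i + 1 + (k : Int) = i + ((k + 1 : Nat) : Int) := by push_cast; ring
        rw [this]
        rfl

theorem pvLoop_eq (tokens : List String) : ∀ (ps : List String) (p : String) (ts : List String)
    (i : Int) (first last : Option Int), 0 ≤ i → ts = tokens.drop i.toNat →
    pvALoop tokens (p :: ps) i first last = pvBLoop ts i (p :: ps) first := by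
  intro ps
  induction ps with
  | nil =>
    intro p ts i first last hi hts
    rw [pvBLoop_char]
    simp only [pvALoop, pvIndexFrom, ← hts]
    cases hk : PySem.List.index? ts p with
    | none => rfl
    | some k =>
      simp only [Int.add_comm (k : Int) i]
      simp
  | cons q ps ih =>
    intro p ts i first last hi hts
    rw [pvBLoop_char]
    simp only [pvALoop, pvIndexFrom, ← hts]
    cases hk : PySem.List.index? ts p with
    | none => rfl
    | some k =>
      simp only [Int.add_comm (k : Int) i]
      exact ih q (ts.drop (k + 1)) (i + (k : Int) + 1)
        (if first.isNone then some (i + (k : Int)) else first) (some (i + (k : Int))) (by omega)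
        (by rw [hts, List.drop_drop]; congr 1; omega)

theorem match_composite_tokens_eq (tokens : List String) (pattern : String) :
    match_composite_tokens tokens pattern = match_composite_tokens_alt tokens pattern := by
  unfold match_composite_tokens match_composite_tokens_alt
  rw [pvParts_eq]
  cases h : pvPartsB pattern with
  | nil => simp
  | cons p ps =>
    simp only [List.isEmpty_cons, if_neg Bool.false_ne_true]
    exact pvLoop_eq tokens ps p tokens 0 none none le_rfl (by simp)

-- ===== VERDICT (by name: the statement is the Claim_ definition above) =====
theorem match_composite_tokens_spec : Claim_equal_match_composite_tokens := by
  intro tokens pattern _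
  exact match_composite_tokens_eq tokens pattern
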